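-- pv_equiv track=rewrite | github.com/BrenoGustavo/AdventoOfCode | 2024/solutions/day_25.py | count_height_key
-- ===== SOURCE A (Python) =====
-- def count_height_key(eschematic):
--
--     lenght = len(eschematic[0])
--     heights = []
--     for i in range(lenght):
--         cur = []
--         for j in eschematic:
--             cur.append(j[i])
--
--         counts_dot = cur.count("#")
--
--         heights.append(counts_dot)
--     return heights
-- ===== SOURCE B (Python) =====
-- def count_height_key(eschematic):
--     n = len(eschematic[0])
--     counts = [0] * n
--     for row in eschematic:
--         counts = [counts[i] + (1 if row[i] == "#" else 0) for i in range(n)]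
--     return counts
-- ===== Notes on version B (the rewrite author's own statement) =====
-- stated objective: alternative
-- what changed: B makes a single row-major pass maintaining a running per-column counter list instead of transposing each column into a fresh list and calling .count on it.
import Mathlib
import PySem

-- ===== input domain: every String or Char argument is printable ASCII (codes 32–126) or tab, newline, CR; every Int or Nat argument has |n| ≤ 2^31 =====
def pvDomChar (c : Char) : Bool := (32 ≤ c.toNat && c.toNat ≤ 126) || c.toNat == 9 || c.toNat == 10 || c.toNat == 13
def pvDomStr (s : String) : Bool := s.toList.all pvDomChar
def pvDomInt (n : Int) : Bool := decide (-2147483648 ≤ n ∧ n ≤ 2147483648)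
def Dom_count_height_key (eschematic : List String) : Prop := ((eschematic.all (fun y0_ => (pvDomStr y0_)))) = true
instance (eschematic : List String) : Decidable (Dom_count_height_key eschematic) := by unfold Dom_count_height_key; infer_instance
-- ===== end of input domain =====

-- B differs from A only by decomposition (one row-major pass with a running counter list); not faster.

-- ===== PORT A =====
-- transliteration of A: for each column i, build the column list 'cur', then count '#'
def count_height_key (eschematic : List String) : List Int :=
  let lenght : Int := PySem.Str.len ((PySem.List.pyGet? eschematic 0).getD "")
  (PySem.List.pyRange 0 lenght 1).foldl (fun heights i =>
    let cur := eschematic.foldl (fun cur j => cur ++ [(PySem.Str.pyGet? j i).getD ' ']) []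
    let counts_dot : Int := (cur.count '#' : Nat)
    heights ++ [counts_dot]) []

-- ===== PORT B =====
-- transliteration of B: counts = [0]*n, then one pass over rows rebuilding counts
def count_height_key_alt (eschematic : List String) : List Int :=
  let n : Int := PySem.Str.len ((PySem.List.pyGet? eschematic 0).getD "")
  eschematic.foldl (fun counts row =>
    (PySem.List.pyRange 0 n 1).map (fun i =>
      (PySem.List.pyGet? counts i).getD 0 +
        if (PySem.Str.pyGet? row i).getD ' ' = '#' then 1 else 0))
    (PySem.List.pyRepeat [(0 : Int)] n)

-- ===== PRECONDITION & SPEC =====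
-- Pre_ excludes exactly the inputs where the Python raises IndexError (both A and B do):
-- the empty grid (eschematic[0]) and grids where some row is shorter than the first row (row[i]).
def Pre_count_height_key (eschematic : List String) : Prop :=
  eschematic ≠ [] ∧
    ∀ row ∈ eschematic, (eschematic.headD "").toList.length ≤ row.toList.length
instance (eschematic : List String) : Decidable (Pre_count_height_key eschematic) := by
  unfold Pre_count_height_key; infer_instance

def pvWitness_count_height_key : List String := ["#.", "##", ".#."]

def Spec_count_height_key (eschematic : List String) (out : List Int) : Prop := out = count_height_key_alt eschematic
instance (eschematic : List String) (out : List Int) : Decidable (Spec_count_height_key eschematic out) := by unfold Spec_count_height_key; infer_instance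

-- ===== CLAIM (what is proved, stated in full; the proofs are below) =====
def Claim_equal_count_height_key : Prop := ∀ (eschematic : List String), Dom_count_height_key eschematic → Pre_count_height_key eschematic → Spec_count_height_key eschematic (count_height_key eschematic)

-- ===== LEMMAS AND PROOFS =====

-- A's value in closed form: column k's character list mapped over rows, counted.
lemma countA_closed (es : List String) (n : Nat)
    (hlen : PySem.Str.len ((PySem.List.pyGet? es 0).getD "") = (n : Int)) :
    count_height_key es =
      (List.range n).map (fun k =>
        (((es.map (fun j => j.toList.getD k ' ')).count '#' : Nat) : Int)) := by
  unfold count_height_key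
  simp only [hlen, PySem.List.pyRange_zero_natCast, List.foldl_map,
    PySem.List.foldl_append_singleton_eq_map]
  simp

-- B's loop invariant: starting from a counts list of the form (range n).map g,
-- folding the rows adds each row's column indicator.
lemma countB_invariant (rows : List String) (n : Nat) (g : Nat → Int)
:
    (∀ row ∈ rows, n ≤ row.toList.length) →
    rows.foldl (fun counts row =>
        (PySem.List.pyRange 0 (n : Int) 1).map (fun i =>
          (PySem.List.pyGet? counts i).getD 0 +
            if (PySem.Str.pyGet? row i).getD ' ' = '#' then 1 else 0))
      ((List.range n).map g) =
    (List.range n).map (fun k =>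
      g k + ((rows.map (fun j => j.toList.getD k ' ')).count '#' : Nat)) := by
  induction rows generalizing g with
  | nil => intro _; simp
  | cons row rest ih =>
    intro hrows
    simp only [List.foldl_cons]
    have hstep :
        (PySem.List.pyRange 0 (n : Int) 1).map (fun i =>
          (PySem.List.pyGet? ((List.range n).map g) i).getD 0 +
            if (PySem.Str.pyGet? row i).getD ' ' = '#' then 1 else 0) =
        (List.range n).map (fun k =>
          g k + if row.toList.getD k ' ' = '#' then 1 else 0) := by
      rw [PySem.List.pyRange_zero_natCast, List.map_map]
      refine List.map_congr_left ?_
      intro k hk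
      have hk' : k < n := List.mem_range.mp hk
      simp [PySem.List.pyGet?_natCast, List.getD, hk']
    rw [hstep, ih _ (fun r hr => hrows r (List.mem_cons_of_mem _ hr))]
    refine List.map_congr_left ?_
    intro k hk
    have hk' : k < n := List.mem_range.mp hk
    simp only [List.map_cons, List.count_cons]
    push_cast
    by_cases h : row.toList.getD k ' ' = '#' <;> simp <;> ring

-- ===== VERDICT (by name: the statement is the Claim_ definition above) =====
theorem count_height_key_spec : Claim_equal_count_height_key := by
  intro es _hdom hpre
  obtain ⟨hne, hrows⟩ := hpre
  set n : Nat := (es.headD "").toList.length with hn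
  have hlen : PySem.Str.len ((PySem.List.pyGet? es 0).getD "") = (n : Int) := by
    cases es with
    | nil => exact absurd rfl hne
    | cons h t => simp [PySem.Str.len_eq, hn]
  unfold Spec_count_height_key
  rw [countA_closed es n hlen]
  unfold count_height_key_alt
  have hrep : PySem.List.pyRepeat [(0 : Int)] (n : Int) = (List.range n).map (fun _ => (0 : Int)) := by
    simp [PySem.List.pyRepeat_singleton, List.map_const']
  simp only [hlen, hrep, countB_invariant es n (fun _ => (0 : Int)) hrows]
  simp
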